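-- pv_equiv track=rewrite | github.com/erikhalasz/Project_lab | run_multiple_simulations.py | count_valid_combinations
-- ===== SOURCE A (Python) =====
-- def count_valid_combinations(highway_speeds, ramp_speeds, mainline_flows, ramp_flows):
--     """Count combinations where highway_speed > ramp_speed without storing them."""
--     count = 0
--     for hs in highway_speeds:
--         for rs in ramp_speeds:
--             if hs <= rs:
--                 continue
--             for _ in mainline_flows:
--                 for _ in ramp_flows:
--                     count += 1
--     return count
-- ===== SOURCE B (Python) =====
-- def count_valid_combinations(highway_speeds, ramp_speeds, mainline_flows, ramp_flows):
--     """Count combinations where highway_speed > ramp_speed without storing them."""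
--     rs_sorted = sorted(ramp_speeds)
--     n = len(rs_sorted)
--     pairs = 0
--     for hs in highway_speeds:
--         # binary search: number of ramp speeds strictly below hs
--         lo, hi = 0, n
--         while lo < hi:
--             mid = (lo + hi) // 2
--             if rs_sorted[mid] < hs:
--                 lo = mid + 1
--             else:
--                 hi = mid
--         pairs += lo
--     return pairs * len(mainline_flows) * len(ramp_flows)
-- ===== Notes on version B (the rewrite author's own statement) =====
-- stated objective: faster
-- what changed: B sorts ramp_speeds once and binary-searches each highway speed to count smaller ramp speeds, then multiplies the pair count by len(mainline_flows)*len(ramp_flows), replacing the four nested counting loops.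
import Mathlib
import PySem

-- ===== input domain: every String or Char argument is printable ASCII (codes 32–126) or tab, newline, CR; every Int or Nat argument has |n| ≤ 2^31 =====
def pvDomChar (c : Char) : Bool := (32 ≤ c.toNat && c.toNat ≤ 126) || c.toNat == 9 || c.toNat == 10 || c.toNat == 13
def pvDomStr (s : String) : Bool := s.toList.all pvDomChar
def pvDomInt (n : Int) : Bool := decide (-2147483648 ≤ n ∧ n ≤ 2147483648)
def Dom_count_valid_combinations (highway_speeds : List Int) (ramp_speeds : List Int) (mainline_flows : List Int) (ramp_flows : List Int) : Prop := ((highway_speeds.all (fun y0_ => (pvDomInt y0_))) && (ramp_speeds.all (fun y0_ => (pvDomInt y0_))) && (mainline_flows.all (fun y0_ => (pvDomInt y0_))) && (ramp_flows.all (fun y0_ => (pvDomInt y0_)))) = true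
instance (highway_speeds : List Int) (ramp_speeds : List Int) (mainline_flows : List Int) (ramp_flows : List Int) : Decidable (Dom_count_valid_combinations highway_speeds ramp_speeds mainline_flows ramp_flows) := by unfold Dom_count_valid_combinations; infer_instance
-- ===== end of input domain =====

-- B replaces A's four nested counting loops by sorting ramp_speeds once, binary-searching each
-- highway speed, and multiplying the pair count by the two flow-list lengths (objective: faster).

-- ===== PORT A =====
-- literal transliteration of A's four nested for-loops
def count_valid_combinations (highway_speeds : List Int) (ramp_speeds : List Int) (mainline_flows : List Int) (ramp_flows : List Int) : Int :=
  highway_speeds.foldl (fun count hs =>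
    ramp_speeds.foldl (fun count rs =>
      if hs ≤ rs then count   -- 'continue'
      else mainline_flows.foldl (fun count _ =>
        ramp_flows.foldl (fun count _ => count + 1) count) count) count) 0

-- ===== PORT B =====
-- Source B's hand-written binary-search while-loop; the index mid always satisfies lo ≤ mid < hi ≤ l.length,
-- so Python's rs_sorted[mid] is exactly l.getD mid 0 here.
def pvBisect (l : List Int) (x : Int) (lo hi : Nat) : Nat :=
  if _h : lo < hi then
    let mid := (lo + hi) / 2
    if l.getD mid 0 < x then pvBisect l x (mid + 1) hi else pvBisect l x lo mid
  else lo
termination_by hi - lo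
decreasing_by all_goals omega

def count_valid_combinations_alt (highway_speeds : List Int) (ramp_speeds : List Int) (mainline_flows : List Int) (ramp_flows : List Int) : Int :=
  let rs_sorted := PySem.List.sorted ramp_speeds (fun x => x) false
  let n := rs_sorted.length
  let pairs := highway_speeds.foldl (fun pairs hs => pairs + (pvBisect rs_sorted hs 0 n : Int)) 0
  pairs * (mainline_flows.length : Int) * (ramp_flows.length : Int)

-- ===== PRECONDITION & SPEC =====
def Spec_count_valid_combinations (highway_speeds : List Int) (ramp_speeds : List Int) (mainline_flows : List Int) (ramp_flows : List Int) (out : Int) : Prop := out = count_valid_combinations_alt highway_speeds ramp_speeds mainline_flows ramp_flows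
instance (highway_speeds : List Int) (ramp_speeds : List Int) (mainline_flows : List Int) (ramp_flows : List Int) (out : Int) : Decidable (Spec_count_valid_combinations highway_speeds ramp_speeds mainline_flows ramp_flows out) := by unfold Spec_count_valid_combinations; infer_instance

-- ===== CLAIM (what is proved, stated in full; the proofs are below) =====
def Claim_equal_count_valid_combinations : Prop := ∀ (highway_speeds : List Int) (ramp_speeds : List Int) (mainline_flows : List Int) (ramp_flows : List Int), Dom_count_valid_combinations highway_speeds ramp_speeds mainline_flows ramp_flows → Spec_count_valid_combinations highway_speeds ramp_speeds mainline_flows ramp_flows (count_valid_combinations highway_speeds ramp_speeds mainline_flows ramp_flows)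

-- ===== LEMMAS AND PROOFS =====

-- innermost loop: for _ in ramp_flows: count += 1
lemma foldF (F : List Int) : ∀ c : Int, F.foldl (fun count _ => count + 1) c = c + F.length := by
  induction F with
  | nil => simp
  | cons f F ih => intro c; rw [List.foldl_cons, ih]; push_cast [List.length_cons]; ring

-- the two flow loops together add mainline_flows.length * ramp_flows.length
lemma foldM (M F : List Int) : ∀ c : Int,
    M.foldl (fun count _ => F.foldl (fun count _ => count + 1) count) c
      = c + (M.length : Int) * F.length := by
  induction M with
  | nil => simp
  | cons m M ih => intro c; rw [List.foldl_cons, ih, foldF]; push_cast [List.length_cons]; ring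

-- the ramp loop adds (#rs < hs) * (M.length * F.length)
lemma foldR (hs : Int) (R M F : List Int) : ∀ c : Int,
    R.foldl (fun count rs =>
      if hs ≤ rs then count
      else M.foldl (fun count _ => F.foldl (fun count _ => count + 1) count) count) c
      = c + ((R.countP (fun rs => decide (rs < hs)) : Int)) * ((M.length : Int) * F.length) := by
  induction R with
  | nil => simp
  | cons r R ih =>
    intro c
    simp only [List.foldl_cons, List.countP_cons]
    by_cases h : hs ≤ r
    · have hnlt : ¬ r < hs := not_lt.mpr h
      rw [if_pos h, ih]
      simp [hnlt]
    · have hlt : r < hs := lt_of_not_ge h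
      rw [if_neg h, ih, foldM]
      simp only [hlt, decide_true, if_pos]
      push_cast [List.length_cons]
      ring

-- A in closed form
lemma A_eq (H R M F : List Int) :
    count_valid_combinations H R M F
      = (H.map (fun hs => (R.countP (fun rs => decide (rs < hs)) : Int))).sum
          * ((M.length : Int) * F.length) := by
  unfold count_valid_combinations
  have key : ∀ c : Int, H.foldl (fun count hs =>
      R.foldl (fun count rs =>
        if hs ≤ rs then count
        else M.foldl (fun count _ => F.foldl (fun count _ => count + 1) count) count) count) c
      = c + (H.map (fun hs => (R.countP (fun rs => decide (rs < hs)) : Int))).sum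
            * ((M.length : Int) * F.length) := by
    induction H with
    | nil => simp
    | cons h H ih =>
      intro c
      rw [List.foldl_cons, ih, foldR, List.map_cons, List.sum_cons]
      ring
  simpa using key 0

-- the binary search returns the number of elements < x, on a sorted list
lemma pvBisect_spec (l : List Int) (x : Int) (hsort : l.Pairwise (· ≤ ·)) :
    ∀ lo hi, lo ≤ hi → hi ≤ l.length →
    (∀ i (h : i < l.length), i < lo → l[i] < x) →
    (∀ i (h : i < l.length), hi ≤ i → x ≤ l[i]) →
    pvBisect l x lo hi = l.countP (fun r => decide (r < x)) := by
  intro lo hi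
  induction lo, hi using pvBisect.induct l x with
  | case1 lo hi hlt mid hmidlt ih =>
    intro _ hhi hlow hhigh
    have hmid : mid < l.length := by
      have : mid < hi := by simp only [mid]; omega
      omega
    rw [List.getD_eq_getElem l 0 hmid] at hmidlt
    rw [pvBisect, dif_pos hlt, if_pos (by rw [List.getD_eq_getElem l 0 hmid]; exact hmidlt)]
    refine ih (by simp only [mid]; omega) hhi ?_ hhigh
    intro i h hi'
    rcases lt_or_eq_of_le (Nat.lt_succ_iff.mp hi') with hlt' | heq
    · exact lt_of_le_of_lt ((List.pairwise_iff_getElem.mp hsort) i mid h hmid hlt') hmidlt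
    · subst heq; exact hmidlt
  | case2 lo hi hlt mid hmidge ih =>
    intro _ hhi hlow hhigh
    have hmid : mid < l.length := by
      have : mid < hi := by simp only [mid]; omega
      omega
    have hxle : x ≤ l[mid] := by
      have h' := not_lt.mp hmidge
      rwa [List.getD_eq_getElem l 0 hmid] at h'
    rw [pvBisect, dif_pos hlt, if_neg hmidge]
    refine ih (by simp only [mid]; omega) (by omega) hlow ?_
    intro i h hi'
    rcases lt_or_eq_of_le hi' with hlt' | heq
    · exact le_trans hxle ((List.pairwise_iff_getElem.mp hsort) mid i hmid h hlt')
    · subst heq; exact hxle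
  | case3 lo hi hnlt =>
    intro hle hhi hlow hhigh
    have hloeq : lo = hi := by omega
    subst hloeq
    rw [pvBisect, dif_neg hnlt]
    -- count the elements < x : exactly the first lo on a sorted list
    have hsplit : l = l.take lo ++ l.drop lo := (List.take_append_drop lo l).symm
    rw [show l.countP (fun r => decide (r < x))
          = (l.take lo ++ l.drop lo).countP (fun r => decide (r < x)) by rw [← hsplit]]
    rw [List.countP_append]
    have h1 : (l.take lo).countP (fun r => decide (r < x)) = (l.take lo).length := by
      rw [List.countP_eq_length]
      intro a ha
      obtain ⟨i, hilen, hival⟩ := List.getElem_of_mem ha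
      have hi1 : i < l.length := by
        have := List.length_take_le lo l; omega
      rw [List.getElem_take] at hival
      simp only [decide_eq_true_eq, ← hival]
      exact hlow i hi1 (by have := hilen; simp at this; omega)
    have h2 : (l.drop lo).countP (fun r => decide (r < x)) = 0 := by
      rw [List.countP_eq_zero]
      intro a ha
      obtain ⟨i, hilen, hival⟩ := List.getElem_of_mem ha
      have hi1 : lo + i < l.length := by simp at hilen; omega
      rw [List.getElem_drop] at hival
      simp only [decide_eq_true_eq, ← hival]
      exact not_lt.mpr (hhigh (lo + i) hi1 (by omega))
    rw [h1, h2]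
    simp
    omega

-- bisect on sorted ramp_speeds counts the ramp speeds below hs in ramp_speeds itself
lemma pvBisect_count (R : List Int) (hs : Int) :
    (pvBisect (PySem.List.sorted R (fun x => x) false) hs 0
        (PySem.List.sorted R (fun x => x) false).length : Int)
      = (R.countP (fun rs => decide (rs < hs)) : Int) := by
  have hsort : (PySem.List.sorted R (fun x => x) false).Pairwise (· ≤ ·) := by
    simpa using PySem.List.sorted_pairwise R (fun x => x)
  have h := pvBisect_spec (PySem.List.sorted R (fun x => x) false) hs hsort 0
      (PySem.List.sorted R (fun x => x) false).length (Nat.zero_le _) le_rfl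
      (by intro i h hi; omega) (by intro i h hi; omega)
  rw [h, (PySem.List.sorted_perm R (fun x => x) false).countP_eq]

-- B in closed form
lemma B_eq (H R M F : List Int) :
    count_valid_combinations_alt H R M F
      = (H.map (fun hs => (R.countP (fun rs => decide (rs < hs)) : Int))).sum
          * ((M.length : Int) * F.length) := by
  unfold count_valid_combinations_alt
  have key : ∀ c : Int, H.foldl (fun pairs hs =>
      pairs + (pvBisect (PySem.List.sorted R (fun x => x) false) hs 0
        (PySem.List.sorted R (fun x => x) false).length : Int)) c
      = c + (H.map (fun hs => (R.countP (fun rs => decide (rs < hs)) : Int))).sum := by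
    induction H with
    | nil => simp
    | cons h H ih =>
      intro c
      rw [List.foldl_cons, ih, pvBisect_count, List.map_cons, List.sum_cons]
      ring
  simp only [key 0]
  ring

-- ===== VERDICT (by name: the statement is the Claim_ definition above) =====
theorem count_valid_combinations_spec : Claim_equal_count_valid_combinations := by
  intro H R M F _
  unfold Spec_count_valid_combinations
  rw [A_eq, B_eq]
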